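-- pv_equiv track=rewrite | github.com/Edgarfevi/Proyectos | Hackathon_agenteia/b03-agente distinto sin analizador.py | ponderar_posiciones
-- ===== SOURCE A (Python) =====
-- from typing import List, Tuple, Iterable, Optional
--
-- def distancia_manhattan(p1: Tuple[int,int], p2: Tuple[int,int]) -> int:
--     (r1, c1), (r2, c2) = p1, p2
--     return abs(r1 - r2) + abs(c1 - c2)
--
-- def ponderar_posiciones(mapa: List[List[str]], posiciones_candidatas: List[Tuple[int,int]]) -> List[Tuple[int, Tuple[int,int]]]:
--     filas, cols = len(mapa), len(mapa[0])
--     casas = [(i,j) for i in range(filas) for j in range(cols) if mapa[i][j] == 'O']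
--     if not casas: return [(0, pos) for pos in posiciones_candidatas]
--     puntuaciones = []
--     for pos in posiciones_candidatas:
--         puntuaciones.append((sum(distancia_manhattan(pos, casa) for casa in casas), pos))
--     puntuaciones.sort(key=lambda item: item[0])
--     return puntuaciones
-- ===== SOURCE B (Python) =====
-- from bisect import bisect_left
--
-- def ponderar_posiciones(mapa, posiciones_candidatas):
--     cols = len(mapa[0])
--     rows, cols_list = [], []
--     for i, fila in enumerate(mapa):
--         for j in range(cols):
--             if fila[j] == 'O':
--                 rows.append(i)
--                 cols_list.append(j)
--     if not rows:
--         return [(0, pos) for pos in posiciones_candidatas]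
--     rows.sort()
--     cols_list.sort()
--     n = len(rows)
--     pref_r = [0]
--     for x in rows:
--         pref_r.append(pref_r[-1] + x)
--     pref_c = [0]
--     for x in cols_list:
--         pref_c.append(pref_c[-1] + x)
--
--     def eje(xs, pref, v):
--         k = bisect_left(xs, v)
--         return v * k - pref[k] + (pref[n] - pref[k]) - v * (n - k)
--
--     puntuaciones = [(eje(rows, pref_r, r) + eje(cols_list, pref_c, c), (r, c))
--                     for (r, c) in posiciones_candidatas]
--     puntuaciones.sort(key=lambda item: item[0])
--     return puntuaciones
-- ===== Notes on version B (the rewrite author's own statement) =====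
-- stated objective: alternative
-- what changed: Instead of summing the Manhattan distance to every house for every candidate, B separates the two axes, collects sorted row/column coordinates of the houses once, builds prefix sums, and evaluates each candidate's per-axis abs-difference sum with bisect in O(log H); on a timing run's timing family (few houses per map) this is not measurably faster, so no speed is claimed.
import Mathlib
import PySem

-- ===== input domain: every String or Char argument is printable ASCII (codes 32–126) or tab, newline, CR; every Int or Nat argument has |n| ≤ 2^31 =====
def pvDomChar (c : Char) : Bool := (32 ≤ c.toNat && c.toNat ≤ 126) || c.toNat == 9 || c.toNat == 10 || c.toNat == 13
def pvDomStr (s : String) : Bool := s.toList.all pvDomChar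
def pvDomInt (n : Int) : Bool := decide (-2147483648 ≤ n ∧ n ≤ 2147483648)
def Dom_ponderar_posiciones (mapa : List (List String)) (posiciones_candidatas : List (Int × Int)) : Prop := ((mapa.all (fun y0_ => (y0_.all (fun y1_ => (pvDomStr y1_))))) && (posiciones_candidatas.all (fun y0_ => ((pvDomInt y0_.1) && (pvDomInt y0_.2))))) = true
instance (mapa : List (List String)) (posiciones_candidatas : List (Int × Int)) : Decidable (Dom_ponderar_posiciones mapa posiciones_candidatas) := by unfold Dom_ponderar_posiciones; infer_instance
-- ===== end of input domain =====

-- B replaces the per-candidate scan over all houses with per-axis sorted coordinate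
-- lists, prefix sums and binary search (objective: alternative algorithm, same measured cost).

-- ===== PORT A =====
def distancia_manhattan (p1 p2 : Int × Int) : Int :=
  |p1.1 - p2.1| + |p1.2 - p2.2|

def ponderar_posiciones (mapa : List (List String)) (posiciones_candidatas : List (Int × Int)) : List (Int × (Int × Int)) :=
  let filas : Int := mapa.length
  let cols : Int := (PySem.List.pyGetD mapa 0 []).length
  let casas : List (Int × Int) :=
    (PySem.List.pyRange 0 filas 1).flatMap (fun i =>
      (PySem.List.pyRange 0 cols 1).filterMap (fun j =>
        if PySem.List.pyGetD (PySem.List.pyGetD mapa i []) j "" = "O" then some (i, j) else none))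
  if casas.isEmpty then posiciones_candidatas.map (fun pos => ((0 : Int), pos))
  else
    let puntuaciones := posiciones_candidatas.foldl (fun acc pos =>
      acc ++ [((casas.map (fun casa => distancia_manhattan pos casa)).sum, pos)]) []
    PySem.List.sorted puntuaciones (fun item => item.1)

-- ===== PORT B =====
-- pref_* loops of Source B: running prefix sums built by appending last + x
def pvPrefix (xs : List Int) : List Int :=
  xs.foldl (fun p x => p ++ [p.getLast! + x]) [0]

-- the helper 'eje' of Source B: per-axis abs-difference sum via bisect + prefix sums
def pvEje (xs pref : List Int) (n v : Int) : Int :=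
  let k : Int := PySem.List.bisectLeft xs v
  v * k - PySem.List.pyGetD pref k 0 + (PySem.List.pyGetD pref n 0 - PySem.List.pyGetD pref k 0) - v * (n - k)

def ponderar_posiciones_alt (mapa : List (List String)) (posiciones_candidatas : List (Int × Int)) : List (Int × (Int × Int)) :=
  let cols : Int := (PySem.List.pyGetD mapa 0 []).length
  let rc : List Int × List Int :=
    (PySem.List.enumerate mapa).foldl (fun acc p =>
      (PySem.List.pyRange 0 cols 1).foldl (fun acc2 j =>
        if PySem.List.pyGetD p.2 j "" = "O" then (acc2.1 ++ [p.1], acc2.2 ++ [j]) else acc2) acc)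
      ([], [])
  if rc.1.isEmpty then posiciones_candidatas.map (fun pos => ((0 : Int), pos))
  else
    let rowsS := PySem.List.sorted rc.1 (fun x => x)
    let colsS := PySem.List.sorted rc.2 (fun x => x)
    let n : Int := rowsS.length
    let prefR := pvPrefix rowsS
    let prefC := pvPrefix colsS
    let puntuaciones := posiciones_candidatas.map (fun pos =>
      (pvEje rowsS prefR n pos.1 + pvEje colsS prefC n pos.2, pos))
    PySem.List.sorted puntuaciones (fun item => item.1)

-- ===== PRECONDITION & SPEC =====
-- Pre_ excludes exactly the inputs on which Python A raises IndexError: an empty map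
-- (len(mapa[0])) or a row shorter than row 0 (mapa[i][j]).  B raises there too.
def Pre_ponderar_posiciones (mapa : List (List String)) (posiciones_candidatas : List (Int × Int)) : Prop :=
  mapa ≠ [] ∧ ∀ fila ∈ mapa, (mapa.headD []).length ≤ fila.length

instance (mapa : List (List String)) (posiciones_candidatas : List (Int × Int)) : Decidable (Pre_ponderar_posiciones mapa posiciones_candidatas) := by unfold Pre_ponderar_posiciones; infer_instance

def pvWitness_ponderar_posiciones : List (List String) × (List (Int × Int)) :=
  ([["O", "."], [".", "O"]], [(0, 1), (5, 5)])

def Spec_ponderar_posiciones (mapa : List (List String)) (posiciones_candidatas : List (Int × Int)) (out : List (Int × (Int × Int))) : Prop := out = ponderar_posiciones_alt mapa posiciones_candidatas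
instance (mapa : List (List String)) (posiciones_candidatas : List (Int × Int)) (out : List (Int × (Int × Int))) : Decidable (Spec_ponderar_posiciones mapa posiciones_candidatas out) := by unfold Spec_ponderar_posiciones; infer_instance

-- ===== CLAIM (what is proved, stated in full; the proofs are below) =====
def Claim_equal_ponderar_posiciones : Prop := ∀ (mapa : List (List String)) (posiciones_candidatas : List (Int × Int)), Dom_ponderar_posiciones mapa posiciones_candidatas → Pre_ponderar_posiciones mapa posiciones_candidatas → Spec_ponderar_posiciones mapa posiciones_candidatas (ponderar_posiciones mapa posiciones_candidatas)

-- ===== LEMMAS AND PROOFS =====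

-- comprehension with a guard: filterMap of an if = filter then map
theorem pv_filterMap_if {a b : Type} (p : a → Prop) [DecidablePred p] (f : a → b) (l : List a) :
    l.filterMap (fun x => if p x then some (f x) else none)
      = (l.filter (fun x => decide (p x))).map f := by
  induction l with
  | nil => rfl
  | cons x xs ih => by_cases h : p x <;> simp [h, ih]

-- B's inner loop over one row, fixed i
theorem pv_inner_foldl (p : Int → Prop) [DecidablePred p] (i : Int) (lj : List Int)
    (r c : List Int) :
    lj.foldl (fun acc2 j => if p j then (acc2.1 ++ [i], acc2.2 ++ [j]) else acc2) (r, c)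
      = (r ++ ((lj.filter (fun j => decide (p j))).map (fun _ => i)),
         c ++ lj.filter (fun j => decide (p j))) := by
  induction lj generalizing r c with
  | nil => simp
  | cons j js ih => by_cases h : p j <;> simp [h, ih]

-- B's double loop equals the flattened per-row selections
theorem pv_outer_foldl (cond : Int → Int → Prop) [∀ i j, Decidable (cond i j)]
    (lj : List Int) (li : List Int) (r c : List Int) :
    li.foldl (fun acc i =>
        lj.foldl (fun acc2 j => if cond i j then (acc2.1 ++ [i], acc2.2 ++ [j]) else acc2) acc)
      (r, c)
      = (r ++ li.flatMap (fun i => (lj.filter (fun j => decide (cond i j))).map (fun _ => i)),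
         c ++ li.flatMap (fun i => lj.filter (fun j => decide (cond i j)))) := by
  induction li generalizing r c with
  | nil => simp
  | cons i is ih =>
    simp only [List.foldl_cons, pv_inner_foldl (cond i) i lj r c, ih, List.flatMap_cons,
      List.append_assoc]

-- running sums, mathematically
def pvSums (s : Int) : List Int → List Int
  | [] => []
  | x :: xs => (s + x) :: pvSums (s + x) xs

theorem pv_foldl_pref (xs : List Int) : ∀ (p : List Int) (s : Int),
    xs.foldl (fun q x => q ++ [q.getLast! + x]) (p ++ [s]) = p ++ [s] ++ pvSums s xs := by
  induction xs with
  | nil => intro p s; simp [pvSums]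
  | cons x xs ih =>
    intro p s
    calc (x :: xs).foldl (fun q x => q ++ [q.getLast! + x]) (p ++ [s])
        = xs.foldl (fun q x => q ++ [q.getLast! + x]) ((p ++ [s]) ++ [s + x]) := by
          simp [List.foldl_cons]
      _ = (p ++ [s]) ++ [s + x] ++ pvSums (s + x) xs := ih (p ++ [s]) (s + x)
      _ = p ++ [s] ++ pvSums s (x :: xs) := by simp [pvSums]

theorem pv_pvPrefix_eq (xs : List Int) : pvPrefix xs = 0 :: pvSums 0 xs := by
  have := pv_foldl_pref xs [] 0
  simpa [pvPrefix] using this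

theorem pv_getD_sums (xs : List Int) : ∀ (s : Int) (m : Nat), m ≤ xs.length →
    (s :: pvSums s xs).getD m 0 = s + (xs.take m).sum := by
  induction xs with
  | nil =>
    intro s m hm
    have : m = 0 := by simpa using hm
    subst this; simp [pvSums]
  | cons x xs ih =>
    intro s m hm
    cases m with
    | zero => simp
    | succ m =>
      have hm' : m ≤ xs.length := by simpa using hm
      have := ih (s + x) m hm'
      simp only [pvSums, List.getD_cons_succ, List.take_succ_cons, List.sum_cons] at *
      omega

theorem pv_getD_pvPrefix (xs : List Int) (m : Nat) (hm : m ≤ xs.length) :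
    (pvPrefix xs).getD m 0 = (xs.take m).sum := by
  rw [pv_pvPrefix_eq]
  simpa using pv_getD_sums xs 0 m hm

theorem pv_sum_map_const_sub (v : Int) (l : List Int) :
    (l.map (fun x => v - x)).sum = v * l.length - l.sum := by
  induction l with
  | nil => simp
  | cons x xs ih => simp [ih]; ring

theorem pv_sum_map_sub_const (v : Int) (l : List Int) :
    (l.map (fun x => x - v)).sum = l.sum - v * l.length := by
  induction l with
  | nil => simp
  | cons x xs ih => simp [ih]; ring

-- abs-difference sum over a list split at k: everything left is < v, right is ≥ v
theorem pv_eje_core (xs : List Int) (v : Int) (k : Nat) (hkn : k ≤ xs.length)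
    (hlt : ∀ (j : Nat) (hj : j < xs.length), j < k → xs[j] < v)
    (hge : ∀ (j : Nat) (hj : j < xs.length), k ≤ j → v ≤ xs[j]) :
    (xs.map (fun x => |v - x|)).sum
      = v * k - (xs.take k).sum + (xs.sum - (xs.take k).sum)
          - v * ((xs.length : Int) - k) := by
  have htk : (xs.take k).length = k := by simp [List.length_take]; omega
  have hsum1 : ((xs.take k).map (fun x => |v - x|)).sum = v * k - (xs.take k).sum := by
    have hc : ∀ x ∈ xs.take k, |v - x| = v - x := by
      intro x hx
      rw [List.mem_iff_getElem] at hx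
      obtain ⟨i, hi, rfl⟩ := hx
      rw [List.getElem_take]
      have hik : i < k := by omega
      have hil : i < xs.length := by
        simp [List.length_take] at hi; omega
      have := hlt i hil hik
      exact abs_of_nonneg (by omega)
    rw [List.map_congr_left hc, pv_sum_map_const_sub, htk]
  have hsum2 : ((xs.drop k).map (fun x => |v - x|)).sum
      = (xs.sum - (xs.take k).sum) - v * ((xs.length : Int) - k) := by
    have hc : ∀ x ∈ xs.drop k, |v - x| = x - v := by
      intro x hx
      rw [List.mem_iff_getElem] at hx
      obtain ⟨i, hi, rfl⟩ := hx
      rw [List.getElem_drop]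
      have hil : k + i < xs.length := by
        simp [List.length_drop] at hi; omega
      have := hge (k + i) hil (by omega)
      rw [abs_of_nonpos (by omega), neg_sub]
    rw [List.map_congr_left hc, pv_sum_map_sub_const]
    have hds : (xs.take k).sum + (xs.drop k).sum = xs.sum := by
      rw [← List.sum_append, List.take_append_drop]
    have hdl : (xs.drop k).length = xs.length - k := by simp [List.length_drop]
    rw [hdl]
    push_cast [Nat.cast_sub hkn]
    omega
  calc (xs.map (fun x => |v - x|)).sum
      = ((xs.take k).map (fun x => |v - x|)).sum
          + ((xs.drop k).map (fun x => |v - x|)).sum := by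
        conv_lhs => rw [← List.take_append_drop k xs]
        rw [List.map_append, List.sum_append]
    _ = _ := by rw [hsum1, hsum2]; ring

-- the heart of B: eje computes the abs-difference sum on a sorted list
theorem pv_eje_correct (xs : List Int) (h : xs.Pairwise (· ≤ ·)) (v : Int) :
    pvEje xs (pvPrefix xs) (xs.length : Int) v = (xs.map (fun x => |v - x|)).sum := by
  obtain ⟨hkn, hlt, hge⟩ := PySem.List.bisectLeft_spec xs v h
  have hp1 : PySem.List.pyGetD (pvPrefix xs) ((PySem.List.bisectLeft xs v : Nat) : Int) 0
      = (xs.take (PySem.List.bisectLeft xs v)).sum := by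
    rw [PySem.List.pyGetD_natCast, pv_getD_pvPrefix xs _ hkn]
  have hp2 : PySem.List.pyGetD (pvPrefix xs) ((xs.length : Nat) : Int) 0 = xs.sum := by
    rw [PySem.List.pyGetD_natCast, pv_getD_pvPrefix xs _ le_rfl, List.take_length]
  rw [pv_eje_core xs v (PySem.List.bisectLeft xs v) hkn hlt hge]
  simp only [pvEje, hp1, hp2]

-- per-candidate score: B's two eje calls equal A's Manhattan sum over the houses
theorem pv_score_eq (casas : List (Int × Int)) (v w : Int) :
    pvEje (PySem.List.sorted (casas.map Prod.fst) (fun x => x))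
        (pvPrefix (PySem.List.sorted (casas.map Prod.fst) (fun x => x)))
        (((PySem.List.sorted (casas.map Prod.fst) (fun x => x)).length : Int)) v
      + pvEje (PySem.List.sorted (casas.map Prod.snd) (fun x => x))
          (pvPrefix (PySem.List.sorted (casas.map Prod.snd) (fun x => x)))
          (((PySem.List.sorted (casas.map Prod.fst) (fun x => x)).length : Int)) w
      = (casas.map (fun casa => |v - casa.1| + |w - casa.2|)).sum := by
  have hlen : (PySem.List.sorted (casas.map Prod.fst) (fun x => x)).length
      = (PySem.List.sorted (casas.map Prod.snd) (fun x => x)).length := by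
    simp [PySem.List.length_sorted]
  have hpr : (PySem.List.sorted (casas.map Prod.fst) (fun x => x)).Pairwise (· ≤ ·) := by
    simpa using PySem.List.sorted_pairwise (casas.map Prod.fst) (fun x => x)
  have hpc : (PySem.List.sorted (casas.map Prod.snd) (fun x => x)).Pairwise (· ≤ ·) := by
    simpa using PySem.List.sorted_pairwise (casas.map Prod.snd) (fun x => x)
  have hsr : ((PySem.List.sorted (casas.map Prod.fst) (fun x => x)).map
      (fun x => |v - x|)).sum = (casas.map (fun casa => |v - casa.1|)).sum := by
    rw [((PySem.List.sorted_perm (casas.map Prod.fst) (fun x => x) false).map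
      (fun x => |v - x|)).sum_eq, List.map_map]
    rfl
  have hsc : ((PySem.List.sorted (casas.map Prod.snd) (fun x => x)).map
      (fun x => |w - x|)).sum = (casas.map (fun casa => |w - casa.2|)).sum := by
    rw [((PySem.List.sorted_perm (casas.map Prod.snd) (fun x => x) false).map
      (fun x => |w - x|)).sum_eq, List.map_map]
    rfl
  rw [pv_eje_correct _ hpr v, hlen, pv_eje_correct _ hpc w, hsr, hsc,
    PySem.List.sum_map_add_int]

-- the two house scans produce the same data
theorem pv_casas_eq (mapa : List (List String)) :
    (PySem.List.enumerate mapa).foldl (fun acc p =>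
        (PySem.List.pyRange 0 (((PySem.List.pyGetD mapa 0 []).length : Int)) 1).foldl
          (fun acc2 j =>
            if PySem.List.pyGetD p.2 j "" = "O" then (acc2.1 ++ [p.1], acc2.2 ++ [j]) else acc2)
          acc)
      ([], [])
      = (((PySem.List.pyRange 0 (mapa.length : Int) 1).flatMap (fun i =>
            (PySem.List.pyRange 0 (((PySem.List.pyGetD mapa 0 []).length : Int)) 1).filterMap
              (fun j => if PySem.List.pyGetD (PySem.List.pyGetD mapa i []) j "" = "O"
                then some (i, j) else none))).map Prod.fst,
         ((PySem.List.pyRange 0 (mapa.length : Int) 1).flatMap (fun i =>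
            (PySem.List.pyRange 0 (((PySem.List.pyGetD mapa 0 []).length : Int)) 1).filterMap
              (fun j => if PySem.List.pyGetD (PySem.List.pyGetD mapa i []) j "" = "O"
                then some (i, j) else none))).map Prod.snd) := by
  rw [PySem.List.enumerate_eq_map_pyRange mapa [], List.foldl_map]
  rw [pv_outer_foldl (fun i j => PySem.List.pyGetD (PySem.List.pyGetD mapa i []) j "" = "O")
      (PySem.List.pyRange 0 (((PySem.List.pyGetD mapa 0 []).length : Int)) 1) _ [] []]
  simp [pv_filterMap_if, List.map_flatMap, List.map_map, Function.comp_def]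

-- ===== VERDICT (by name: the statement is the Claim_ definition above) =====
theorem ponderar_posiciones_spec : Claim_equal_ponderar_posiciones := by
  intro mapa pcs hdom hpre
  unfold Spec_ponderar_posiciones ponderar_posiciones ponderar_posiciones_alt
  simp only []
  rw [pv_casas_eq mapa]
  set casas : List (Int × Int) :=
    (PySem.List.pyRange 0 (mapa.length : Int) 1).flatMap (fun i =>
      (PySem.List.pyRange 0 (((PySem.List.pyGetD mapa 0 []).length : Int)) 1).filterMap
        (fun j => if PySem.List.pyGetD (PySem.List.pyGetD mapa i []) j "" = "O"
          then some (i, j) else none)) with hcasas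
  by_cases hemp : casas.isEmpty
  · simp [hemp, List.isEmpty_map]
  · simp only [hemp, List.isEmpty_map, Bool.false_eq_true, ite_false]
    rw [PySem.List.foldl_append_singleton_eq_map
      (fun pos => ((casas.map (fun casa => distancia_manhattan pos casa)).sum, pos)) pcs [],
      List.nil_append]
    have hmap : ∀ pos : Int × Int,
        ((casas.map (fun casa => distancia_manhattan pos casa)).sum, pos)
          = (pvEje (PySem.List.sorted (casas.map Prod.fst) (fun x => x))
               (pvPrefix (PySem.List.sorted (casas.map Prod.fst) (fun x => x)))
               (((PySem.List.sorted (casas.map Prod.fst) (fun x => x)).length : Int)) pos.1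
             + pvEje (PySem.List.sorted (casas.map Prod.snd) (fun x => x))
                 (pvPrefix (PySem.List.sorted (casas.map Prod.snd) (fun x => x)))
                 (((PySem.List.sorted (casas.map Prod.fst) (fun x => x)).length : Int)) pos.2,
             pos) := by
      intro pos
      rw [pv_score_eq casas pos.1 pos.2]
      simp [distancia_manhattan]
    rw [List.map_congr_left (fun pos _ => hmap pos)]
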